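-- pv_equiv track=rewrite | github.com/MarekUlip/CollegePythonScripts | DataAnalysisMethods1/10seminar.py | create_partity_of_x
-- ===== SOURCE A (Python) =====
-- def create_partity_of_x(matrix):
--     cols = len(matrix[0])
--     rows = len(matrix)
--     new_matrix = [[0 for x in range(cols)] for x in range(cols)]
--     for j in range(cols):
--         for i in range(rows):
--             if matrix[i][j] == 1:
--                 for k in range(i,rows):
--                     if matrix[k][j] == 1:
--                         for l in range(cols):
--                             if matrix[i][l] == 1 or matrix[k][l] == 1:
--                                 new_matrix[j][l] = new_matrix[l][j] = 1
--     return new_matrix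
-- ===== SOURCE B (Python) =====
-- def create_partity_of_x(matrix):
--     cols = len(matrix[0])
--     new_matrix = [[0] * cols for _ in range(cols)]
--     for row in matrix:
--         ones = [j for j in range(cols) if row[j] == 1]
--         for a in ones:
--             for b in ones:
--                 new_matrix[a][b] = 1
--     return new_matrix
-- ===== Notes on version B (the rewrite author's own statement) =====
-- stated objective: faster
-- what changed: Instead of A's quadruple loop over column pairs and row pairs, B makes one pass over the rows, collects each row's 1-columns, and marks every pair of them; this is exact because a pair of columns is marked by A iff some single row has 1 in both.
import Mathlib
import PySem

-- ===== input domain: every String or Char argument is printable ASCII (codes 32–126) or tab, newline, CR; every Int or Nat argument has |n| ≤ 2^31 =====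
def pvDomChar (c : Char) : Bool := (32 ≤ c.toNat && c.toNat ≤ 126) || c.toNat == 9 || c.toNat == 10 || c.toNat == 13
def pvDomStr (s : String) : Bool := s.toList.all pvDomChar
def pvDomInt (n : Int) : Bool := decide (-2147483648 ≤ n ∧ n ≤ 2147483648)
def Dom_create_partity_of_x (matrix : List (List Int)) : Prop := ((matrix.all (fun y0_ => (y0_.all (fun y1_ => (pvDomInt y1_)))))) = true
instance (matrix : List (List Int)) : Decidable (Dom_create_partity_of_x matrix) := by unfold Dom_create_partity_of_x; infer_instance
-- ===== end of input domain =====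

-- B replaces A's quadruple loop (pairs of columns × pairs of rows) by a single pass over the
-- rows that marks all pairs of 1-columns of each row: an asymptotic speed-up, same output.

-- matrix[i][j] for NONNEGATIVE indices; inside Pre_ every read below is in range, where getD is exact.
def pvEntryGet (m : List (List Int)) (i j : Nat) : Int := (m.getD i []).getD j 0

-- the Python statement 'new_matrix[a][b] = 1' (in-range under Pre_; out of range it is a no-op)
def pvSetE (nm : List (List Int)) (a b : Nat) : List (List Int) :=
  nm.set a ((nm.getD a []).set b 1)

-- ===== PORT A =====
-- 'range(cols)' / 'range(rows)' = List.range, 'range(i, rows)' = List.range' i (rows - i)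
-- (exact: all bounds are natural numbers here).
def create_partity_of_x (matrix : List (List Int)) : List (List Int) :=
  let cols := (matrix.getD 0 []).length       -- len(matrix[0]); matrix ≠ [] under Pre_
  let rows := matrix.length
  let new0 := List.replicate cols (List.replicate cols (0 : Int))
  (List.range cols).foldl (fun nm j =>
    (List.range rows).foldl (fun nm i =>
      if pvEntryGet matrix i j = 1 then
        (List.range' i (rows - i)).foldl (fun nm k =>
          if pvEntryGet matrix k j = 1 then
            (List.range cols).foldl (fun nm l =>
              if pvEntryGet matrix i l = 1 ∨ pvEntryGet matrix k l = 1 then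
                -- 'new_matrix[j][l] = new_matrix[l][j] = 1': assigns left to right
                pvSetE (pvSetE nm j l) l j
              else nm) nm
          else nm) nm
      else nm) nm) new0

-- ===== PORT B =====
def create_partity_of_x_alt (matrix : List (List Int)) : List (List Int) :=
  let cols := (matrix.getD 0 []).length
  let new0 := List.replicate cols (List.replicate cols (0 : Int))
  matrix.foldl (fun nm row =>
    let ones := (List.range cols).filter (fun j => row.getD j 0 == 1)
    ones.foldl (fun nm a => ones.foldl (fun nm b => pvSetE nm a b) nm) nm) new0

-- ===== PRECONDITION & SPEC =====
-- Exactly where the Python A returns: matrix nonempty (len(matrix[0])) and every row at least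
-- as long as the first (matrix[i][j] for j < len(matrix[0])); otherwise A (and B) raise IndexError.
def Pre_create_partity_of_x (matrix : List (List Int)) : Prop :=
  matrix ≠ [] ∧ ∀ row ∈ matrix, (matrix.getD 0 []).length ≤ row.length
instance (matrix : List (List Int)) : Decidable (Pre_create_partity_of_x matrix) := by
  unfold Pre_create_partity_of_x; infer_instance

def pvWitness_create_partity_of_x : List (List Int) := [[1, 0], [0, 1]]

def Spec_create_partity_of_x (matrix : List (List Int)) (out : List (List Int)) : Prop := out = create_partity_of_x_alt matrix
instance (matrix : List (List Int)) (out : List (List Int)) : Decidable (Spec_create_partity_of_x matrix out) := by unfold Spec_create_partity_of_x; infer_instance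

-- ===== CLAIM (what is proved, stated in full; the proofs are below) =====
def Claim_equal_create_partity_of_x : Prop := ∀ (matrix : List (List Int)), Dom_create_partity_of_x matrix → Pre_create_partity_of_x matrix → Spec_create_partity_of_x matrix (create_partity_of_x matrix)

-- ===== LEMMAS AND PROOFS =====

-- both programs only ever write the constant 1 into an all-zero cols×cols matrix, so each is
-- determined by the SET of (row-index, col-index) pairs it touches; we flatten each program's
-- loops into its list of touched pairs and show the two lists have the same in-range members.

def pvShape (c : Nat) (nm : List (List Int)) : Prop :=
  nm.length = c ∧ ∀ r ∈ nm, r.length = c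

def pvApply (nm : List (List Int)) (ops : List (Nat × Nat)) : List (List Int) :=
  ops.foldl (fun m p => pvSetE m p.1 p.2) nm

theorem pvShape_setE {c : Nat} {nm : List (List Int)} (a b : Nat) (h : pvShape c nm) :
    pvShape c (pvSetE nm a b) := by
  obtain ⟨hl, hr⟩ := h
  by_cases ha : a < nm.length
  · refine ⟨by simp [pvSetE, hl], ?_⟩
    intro r hmem
    rcases List.mem_or_eq_of_mem_set hmem with h1 | h1
    · exact hr r h1
    · subst h1
      rw [List.getD_eq_getElem _ _ ha, List.length_set]
      exact hr _ (List.getElem_mem ha)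
  · rw [pvSetE, List.set_eq_of_length_le (by omega)]
    exact ⟨hl, hr⟩

theorem pvEntryGet_setE {c : Nat} {nm : List (List Int)} (h : pvShape c nm) (a b j l : Nat) :
    pvEntryGet (pvSetE nm a b) j l =
      if j = a ∧ l = b ∧ a < c ∧ b < c then 1 else pvEntryGet nm j l := by
  obtain ⟨hl0, hr0⟩ := h
  by_cases hja : j = a
  · subst hja
    by_cases hjc : j < c
    · have hjn : j < nm.length := by omega
      have hrow : nm.getD j [] = nm[j] := List.getD_eq_getElem _ _ hjn
      have hrl : nm[j].length = c := hr0 _ (List.getElem_mem hjn)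
      have h1 : (pvSetE nm j b).getD j [] = (nm[j]).set b 1 := by
        rw [pvSetE, hrow, List.getD_eq_getElem?_getD, List.getElem?_set, if_pos rfl,
          if_pos hjn]
        rfl
      rw [pvEntryGet, pvEntryGet, h1, hrow]
      by_cases hlb : l = b
      · subst hlb
        by_cases hbc : l < c
        · rw [if_pos ⟨rfl, rfl, hjc, hbc⟩,
            List.getD_eq_getElem _ _ (by rw [List.length_set]; omega),
            List.getElem_set_self (by rw [List.length_set]; omega)]
        · rw [if_neg (by tauto), List.set_eq_of_length_le (by omega)]
      · rw [if_neg (by tauto), List.getD_eq_getElem?_getD, List.getD_eq_getElem?_getD,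
          List.getElem?_set, if_neg (by omega)]
    · rw [if_neg (by tauto), pvSetE, List.set_eq_of_length_le (by omega)]
  · rw [if_neg (by tauto)]
    have hrow : (nm.set a ((nm.getD a []).set b 1)).getD j [] = nm.getD j [] := by
      rw [List.getD_eq_getElem?_getD, List.getElem?_set, if_neg (fun hc => hja hc.symm),
        ← List.getD_eq_getElem?_getD]
    rw [pvEntryGet, pvEntryGet, pvSetE, hrow]

theorem pvShape_apply {c : Nat} (ops : List (Nat × Nat)) {nm : List (List Int)}
    (h : pvShape c nm) : pvShape c (pvApply nm ops) := by
  induction ops generalizing nm with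
  | nil => exact h
  | cons p t ih => exact ih (pvShape_setE p.1 p.2 h)

theorem pvEntryGet_apply {c : Nat} (ops : List (Nat × Nat)) {nm : List (List Int)}
    (h : pvShape c nm) {j l : Nat} (hj : j < c) (hl : l < c) :
    pvEntryGet (pvApply nm ops) j l = if (j, l) ∈ ops then 1 else pvEntryGet nm j l := by
  induction ops generalizing nm with
  | nil => simp [pvApply]
  | cons p t ih =>
    show pvEntryGet (pvApply (pvSetE nm p.1 p.2) t) j l = _
    rw [ih (pvShape_setE p.1 p.2 h), pvEntryGet_setE h p.1 p.2 j l]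
    by_cases hm : (j, l) ∈ t
    · rw [if_pos hm, if_pos (List.mem_cons_of_mem _ hm)]
    · rw [if_neg hm]
      by_cases he : j = p.1 ∧ l = p.2
      · obtain ⟨he1, he2⟩ := he
        have hp : p = (j, l) := by cases p; simp_all
        rw [if_pos ⟨he1, he2, by omega, by omega⟩, if_pos (by simp [hp])]
      · rw [if_neg (by tauto), if_neg ?_]
        intro hc
        rcases List.mem_cons.mp hc with hc | hc
        · exact he (by cases p; cases hc; exact ⟨rfl, rfl⟩)
        · exact hm hc

theorem pvApply_append (nm : List (List Int)) (l1 l2 : List (Nat × Nat)) :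
    pvApply nm (l1 ++ l2) = pvApply (pvApply nm l1) l2 := by
  simp [pvApply, List.foldl_append]

theorem pvFoldl_ops {α : Type} (F : α → List (Nat × Nat))
    (g : List (List Int) → α → List (List Int))
    (hg : ∀ m x, g m x = pvApply m (F x)) :
    ∀ (xs : List α) (nm : List (List Int)), xs.foldl g nm = pvApply nm (xs.flatMap F) := by
  intro xs
  induction xs with
  | nil => intro nm; simp [pvApply]
  | cons x t ih =>
    intro nm
    rw [List.foldl_cons, hg, ih, List.flatMap_cons, pvApply_append]

-- the pair lists the two programs touch
def pvOpsA (matrix : List (List Int)) : List (Nat × Nat) :=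
  (List.range (matrix.getD 0 []).length).flatMap (fun j =>
    (List.range matrix.length).flatMap (fun i =>
      if pvEntryGet matrix i j = 1 then
        (List.range' i (matrix.length - i)).flatMap (fun k =>
          if pvEntryGet matrix k j = 1 then
            (List.range (matrix.getD 0 []).length).flatMap (fun l =>
              if pvEntryGet matrix i l = 1 ∨ pvEntryGet matrix k l = 1 then [(j, l), (l, j)]
              else [])
          else [])
      else []))

def pvOpsB (matrix : List (List Int)) : List (Nat × Nat) :=
  matrix.flatMap (fun row =>
    ((List.range (matrix.getD 0 []).length).filter (fun j => row.getD j 0 == 1)).flatMap (fun a =>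
      ((List.range (matrix.getD 0 []).length).filter (fun j => row.getD j 0 == 1)).flatMap
        (fun b => [(a, b)])))

theorem pvA_eq_apply (matrix : List (List Int)) :
    create_partity_of_x matrix =
      pvApply (List.replicate (matrix.getD 0 []).length
        (List.replicate (matrix.getD 0 []).length (0 : Int))) (pvOpsA matrix) := by
  show (List.range (matrix.getD 0 []).length).foldl _ _ = _
  rw [pvOpsA]
  apply pvFoldl_ops
  intro m j
  apply pvFoldl_ops
  intro m i
  split_ifs with h1
  · apply pvFoldl_ops
    intro m k
    split_ifs with h2
    · apply pvFoldl_ops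
      intro m l
      split_ifs with h3 <;> rfl
    · rfl
  · rfl

theorem pvB_eq_apply (matrix : List (List Int)) :
    create_partity_of_x_alt matrix =
      pvApply (List.replicate (matrix.getD 0 []).length
        (List.replicate (matrix.getD 0 []).length (0 : Int))) (pvOpsB matrix) := by
  show matrix.foldl _ _ = _
  rw [pvOpsB]
  apply pvFoldl_ops
  intro m row
  apply pvFoldl_ops
  intro m a
  apply pvFoldl_ops
  intro m b
  rfl

theorem pvMem_opsA (matrix : List (List Int)) (p q : Nat) :
    (p, q) ∈ pvOpsA matrix ↔
      ∃ row ∈ matrix, p < (matrix.getD 0 []).length ∧ q < (matrix.getD 0 []).length ∧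
        row.getD p 0 = 1 ∧ row.getD q 0 = 1 := by
  rw [pvOpsA]
  simp only [List.mem_flatMap, List.mem_range, List.mem_ite_nil_right, List.mem_range'_1,
    List.mem_cons, List.not_mem_nil, or_false, Prod.mk.injEq]
  constructor
  · rintro ⟨j, hj, i, hi, hij, k, ⟨hik, hk'⟩, hkj, l, hl, hor, heq⟩
    have hk : k < matrix.length := by omega
    have ei : matrix.getD i [] = matrix[i] := List.getD_eq_getElem _ _ hi
    have ek : matrix.getD k [] = matrix[k] := List.getD_eq_getElem _ _ hk
    rcases hor with hor | hor
    · rcases heq with ⟨h1, h2⟩ | ⟨h1, h2⟩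
      · exact ⟨matrix[i], List.getElem_mem hi, h1 ▸ hj, h2 ▸ hl,
          by rw [h1, ← ei]; exact hij, by rw [h2, ← ei]; exact hor⟩
      · exact ⟨matrix[i], List.getElem_mem hi, h1 ▸ hl, h2 ▸ hj,
          by rw [h1, ← ei]; exact hor, by rw [h2, ← ei]; exact hij⟩
    · rcases heq with ⟨h1, h2⟩ | ⟨h1, h2⟩
      · exact ⟨matrix[k], List.getElem_mem hk, h1 ▸ hj, h2 ▸ hl,
          by rw [h1, ← ek]; exact hkj, by rw [h2, ← ek]; exact hor⟩
      · exact ⟨matrix[k], List.getElem_mem hk, h1 ▸ hl, h2 ▸ hj,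
          by rw [h1, ← ek]; exact hor, by rw [h2, ← ek]; exact hkj⟩
  · rintro ⟨row, hrow, hp, hq, h1, h2⟩
    obtain ⟨r, hr, hre⟩ := List.mem_iff_getElem.mp hrow
    have er : matrix.getD r [] = row := by rw [List.getD_eq_getElem _ _ hr, hre]
    have g1 : pvEntryGet matrix r p = 1 := by rw [pvEntryGet, er]; exact h1
    have g2 : pvEntryGet matrix r q = 1 := by rw [pvEntryGet, er]; exact h2
    exact ⟨p, hp, r, hr, g1, r, ⟨le_refl r, by omega⟩, g1, q, hq, Or.inl g2,
      Or.inl ⟨rfl, rfl⟩⟩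

theorem pvMem_opsB (matrix : List (List Int)) (p q : Nat) :
    (p, q) ∈ pvOpsB matrix ↔
      ∃ row ∈ matrix, p < (matrix.getD 0 []).length ∧ q < (matrix.getD 0 []).length ∧
        row.getD p 0 = 1 ∧ row.getD q 0 = 1 := by
  rw [pvOpsB]
  simp only [List.mem_flatMap, List.mem_filter, List.mem_range, List.mem_singleton,
    beq_iff_eq, Prod.mk.injEq]
  constructor
  · rintro ⟨row, hrow, a, ⟨ha, ha1⟩, b, ⟨hb, hb1⟩, hpa, hqb⟩
    subst hpa; subst hqb
    exact ⟨row, hrow, ha, hb, ha1, hb1⟩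
  · rintro ⟨row, hrow, hp, hq, h1, h2⟩
    exact ⟨row, hrow, p, ⟨hp, h1⟩, q, ⟨hq, h2⟩, rfl, rfl⟩

theorem pvApply_eq_of_mem_iff {c : Nat} (ops1 ops2 : List (Nat × Nat))
    (h : ∀ p q : Nat, p < c → q < c → ((p, q) ∈ ops1 ↔ (p, q) ∈ ops2))
    {nm : List (List Int)} (hs : pvShape c nm) :
    pvApply nm ops1 = pvApply nm ops2 := by
  obtain ⟨hl1, hr1⟩ := pvShape_apply (c := c) ops1 hs
  obtain ⟨hl2, hr2⟩ := pvShape_apply (c := c) ops2 hs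
  apply List.ext_getElem (by omega)
  intro j hj1 hj2
  have hjc : j < c := by omega
  have hlen1 : (pvApply nm ops1)[j].length = c := hr1 _ (List.getElem_mem hj1)
  have hlen2 : (pvApply nm ops2)[j].length = c := hr2 _ (List.getElem_mem hj2)
  apply List.ext_getElem (by omega)
  intro l hl1' hl2'
  have hlc : l < c := by omega
  have e1 : (pvApply nm ops1)[j][l] = pvEntryGet (pvApply nm ops1) j l := by
    rw [pvEntryGet, List.getD_eq_getElem _ _ hj1, List.getD_eq_getElem _ _ hl1']
  have e2 : (pvApply nm ops2)[j][l] = pvEntryGet (pvApply nm ops2) j l := by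
    rw [pvEntryGet, List.getD_eq_getElem _ _ hj2, List.getD_eq_getElem _ _ hl2']
  rw [e1, e2, pvEntryGet_apply ops1 hs hjc hlc, pvEntryGet_apply ops2 hs hjc hlc]
  by_cases hmem : (j, l) ∈ ops1
  · rw [if_pos hmem, if_pos ((h _ _ hjc hlc).mp hmem)]
  · rw [if_neg hmem, if_neg (fun hc => hmem ((h _ _ hjc hlc).mpr hc))]

-- ===== VERDICT (by name: the statement is the Claim_ definition above) =====
theorem create_partity_of_x_spec : Claim_equal_create_partity_of_x := by
  intro matrix _ _
  unfold Spec_create_partity_of_x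
  rw [pvA_eq_apply, pvB_eq_apply]
  apply pvApply_eq_of_mem_iff (c := (matrix.getD 0 []).length)
  · intro p q hp hq
    rw [pvMem_opsA, pvMem_opsB]
  · refine ⟨List.length_replicate, ?_⟩
    intro r hr
    rw [List.eq_of_mem_replicate hr]
    exact List.length_replicate
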